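-- pv_equiv track=rewrite | github.com/amar673/codemind-python | OTP_Generation.py | otp
-- ===== SOURCE A (Python) =====
-- def otp(a):
--     rev=0
--     a1=[]
--     while(a):
--         b=a%10
--         a=a//10
--         if b%2:
--             b=b*b
--             a1.append(b)
--     return a1
-- ===== SOURCE B (Python) =====
-- def otp(a):
--     # idiomatic: walk the decimal string of a from the last digit to the first
--     return [int(c) ** 2 for c in reversed(str(a)) if int(c) % 2]
-- ===== Notes on version B (the rewrite author's own statement) =====
-- stated objective: idiomatic
-- what changed: Replaces the %10 // 10 arithmetic digit-extraction loop with a comprehension over the reversed decimal string representation of a.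
import Mathlib
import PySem

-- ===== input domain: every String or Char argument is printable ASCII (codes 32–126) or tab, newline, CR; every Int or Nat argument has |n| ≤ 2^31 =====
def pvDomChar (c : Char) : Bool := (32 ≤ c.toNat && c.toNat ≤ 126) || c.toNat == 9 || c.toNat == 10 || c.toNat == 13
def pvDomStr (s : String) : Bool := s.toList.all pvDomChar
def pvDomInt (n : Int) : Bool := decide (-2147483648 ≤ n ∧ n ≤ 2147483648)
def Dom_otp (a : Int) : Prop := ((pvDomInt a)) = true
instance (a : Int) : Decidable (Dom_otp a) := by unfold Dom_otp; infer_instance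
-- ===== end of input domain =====

-- B replaces A's %10 // 10 arithmetic digit loop with a traversal of the reversed decimal string of a (idiomatic, same cost).


-- ===== PORT A =====
-- the while loop of A; 'while(a)' is 'a ≠ 0', written as '0 < a' as a totality
-- guard (equivalent on Pre_: for a < 0 the Python loop never terminates)
def otpLoop (a : Int) (acc : List Int) : List Int :=
  if _h : 0 < a then
    let b := PySem.Int.mod a 10
    otpLoop (PySem.Int.floordiv a 10)
      (if PySem.Int.mod b 2 ≠ 0 then acc ++ [b * b] else acc)
  else acc
termination_by a.toNat
decreasing_by
  simp only [PySem.Int.floordiv, Int.fdiv_eq_ediv]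
  omega

def otp (a : Int) : List Int := otpLoop a []

-- ===== PORT B =====
def otp_alt (a : Int) : List Int :=
  (PySem.Int.toStr a).toList.reverse.filterMap (fun c =>
    let d : Int := (PySem.Int.ofChars? [c]).getD 0   -- int(c); always a digit char when 0 ≤ a
    if PySem.Int.mod d 2 ≠ 0 then some (d * d) else none)

-- ===== PRECONDITION & SPEC =====
-- Pre_ excludes a < 0: there the Python A loops forever (a//10 never reaches 0).
def Pre_otp (a : Int) : Prop := 0 ≤ a
instance (a : Int) : Decidable (Pre_otp a) := by unfold Pre_otp; infer_instance
def pvWitness_otp : Int := (12345)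

def Spec_otp (a : Int) (out : List Int) : Prop := out = otp_alt a
instance (a : Int) (out : List Int) : Decidable (Spec_otp a out) := by unfold Spec_otp; infer_instance

-- ===== CLAIM (what is proved, stated in full; the proofs are below) =====
def Claim_equal_otp : Prop := ∀ (a : Int), Dom_otp a → Pre_otp a → Spec_otp a (otp a)

-- ===== LEMMAS AND PROOFS =====

theorem otpLoop_nonpos (a : Int) (h : ¬ 0 < a) (acc : List Int) :
    otpLoop a acc = acc := by
  rw [otpLoop, dif_neg h]

-- the MSB-first decimal representation, as a structural recursion
def rep (n : Nat) : List Char :=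
  if _h : n < 10 then [Nat.digitChar n]
  else rep (n / 10) ++ [Nat.digitChar (n % 10)]
termination_by n
decreasing_by omega

theorem toDigitsCore_eq (fuel : Nat) : ∀ (n : Nat) (acc : List Char), n < fuel →
    Nat.toDigitsCore 10 fuel n acc = rep n ++ acc := by
  induction fuel with
  | zero => intro n acc h; omega
  | succ f ih =>
    intro n acc h
    rw [Nat.toDigitsCore]
    by_cases h10 : n / 10 = 0
    · simp only [h10]
      rw [rep]
      have hn : n < 10 := by omega
      rw [dif_pos hn, Nat.mod_eq_of_lt hn]
      simp
    · rw [if_neg h10, ih (n / 10) _ (by omega)]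
      conv_rhs => rw [rep]
      rw [dif_neg (by omega)]
      simp

theorem toDigits_eq_rep (n : Nat) : Nat.toDigits 10 n = rep n := by
  have := toDigitsCore_eq (n + 1) n [] (by omega)
  simpa [Nat.toDigits] using this

-- the filter B applies to one character
def g (c : Char) : Option Int :=
  let d : Int := (PySem.Int.ofChars? [c]).getD 0
  if PySem.Int.mod d 2 ≠ 0 then some (d * d) else none

theorem g_digitChar (d : Nat) (hd : d < 10) :
    g (Nat.digitChar d) =
      if PySem.Int.mod (d : Int) 2 ≠ 0 then some ((d : Int) * d) else none := by
  interval_cases d <;> decide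

theorem otpLoop_eq (n : Nat) : ∀ (acc : List Int), 0 < n →
    otpLoop (n : Int) acc = acc ++ (rep n).reverse.filterMap g := by
  induction n using Nat.strong_induction_on with
  | _ n ih =>
    intro acc hn
    rw [otpLoop, dif_pos (by exact_mod_cast hn)]
    have hmod : PySem.Int.mod (n : Int) 10 = ((n % 10 : Nat) : Int) := by
      simp [PySem.Int.mod, Int.fmod_eq_emod]
    have hdiv : PySem.Int.floordiv (n : Int) 10 = ((n / 10 : Nat) : Int) := by
      simp [PySem.Int.floordiv, Int.fdiv_eq_ediv]
    by_cases h10 : n < 10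
    · have hz : n / 10 = 0 := by omega
      have hm : n % 10 = n := Nat.mod_eq_of_lt h10
      rw [hmod, hdiv, hz, hm, Nat.cast_zero, otpLoop_nonpos 0 (by norm_num)]
      rw [rep, dif_pos h10, List.reverse_singleton, List.filterMap_cons,
        List.filterMap_nil, g_digitChar n h10]
      split <;> simp_all
    · rw [hmod, hdiv]
      rw [ih (n / 10) (by omega) _ (by omega)]
      conv_rhs => rw [rep, dif_neg (by omega)]
      rw [List.reverse_append]
      simp only [List.reverse_singleton, List.singleton_append, List.filterMap_cons]
      rw [g_digitChar (n % 10) (by omega)]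
      split <;> simp

theorem otp_alt_of_nonneg (a : Int) (h : 0 ≤ a) :
    otp_alt a = (rep a.toNat).reverse.filterMap g := by
  unfold otp_alt
  have : (PySem.Int.toStr a).toList = Nat.toDigits 10 a.toNat := by
    rw [PySem.Int.toList_toStr]
    simp [PySem.Int.toChars, not_lt.mpr h]
  rw [this, toDigits_eq_rep]
  rfl

-- ===== VERDICT (by name: the statement is the Claim_ definition above) =====
theorem otp_spec : Claim_equal_otp := by
  intro a _ hpre
  unfold Spec_otp
  rcases eq_or_lt_of_le hpre with h0 | hpos
  · subst a
    rw [otp, otpLoop_nonpos 0 (by norm_num)]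
    decide
  · rw [otp_alt_of_nonneg a hpre]
    have ha : a = ((a.toNat : Nat) : Int) := by omega
    have h := otpLoop_eq a.toNat [] (by omega)
    rw [← ha] at h
    unfold otp
    rw [h]
    simp
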